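-- pv_equiv track=rewrite | github.com/rbuckley-git/AdventOfCode2022 | day6.py | get_marker_position
-- ===== SOURCE A (Python) =====
-- def get_marker_position( s, marker_length ):
--     buffer = []
--     for i in range(0,len(s)):
--         # add character onto buffer popping first one out if length is greater than we are looking for.
--         buffer.append(s[i])
--         if len(buffer)>marker_length:
--             buffer.pop(0)
--
--         if marker_length == len(set(buffer)):
--             return i+1
-- ===== SOURCE B (Python) =====
-- def get_marker_position(s, marker_length):
--     # O(n) sliding window: per-character counts plus a distinct counter,
--     # window tracked by a start index instead of rebuilding a set each step.
--     counts = {}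
--     distinct = 0
--     start = 0
--     for i in range(len(s)):
--         c = s[i]
--         counts[c] = counts.get(c, 0) + 1
--         if counts[c] == 1:
--             distinct += 1
--         while start <= i and i + 1 - start > marker_length:
--             d = s[start]
--             counts[d] -= 1
--             if counts[d] == 0:
--                 distinct -= 1
--             start += 1
--         if distinct == marker_length:
--             return i + 1
-- ===== Notes on version B (the rewrite author's own statement) =====
-- stated objective: faster
-- what changed: Replaces A's per-position rebuild of set(buffer) (and list pop(0)) by a single-pass sliding window that maintains a char-count dict, a distinct counter and a start index, so each step is O(1) instead of O(marker_length).
import Mathlib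
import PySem

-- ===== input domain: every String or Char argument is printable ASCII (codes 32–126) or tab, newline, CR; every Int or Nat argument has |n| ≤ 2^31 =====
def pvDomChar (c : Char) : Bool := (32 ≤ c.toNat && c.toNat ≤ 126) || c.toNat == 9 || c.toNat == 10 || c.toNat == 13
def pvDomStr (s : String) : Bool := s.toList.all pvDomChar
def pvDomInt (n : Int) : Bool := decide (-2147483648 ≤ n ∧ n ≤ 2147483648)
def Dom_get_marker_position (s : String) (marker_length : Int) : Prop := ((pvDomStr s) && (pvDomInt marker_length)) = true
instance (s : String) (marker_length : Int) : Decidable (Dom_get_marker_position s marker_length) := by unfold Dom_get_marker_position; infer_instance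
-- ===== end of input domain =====

-- B replaces A's per-step set(buffer) rebuild by an O(n) sliding window with a
-- char-count dict, a distinct counter and a start index (return value only).

-- ===== PORT A =====
-- A: keep a buffer of the last chars (pop front when longer than marker_length),
-- return i+1 as soon as len(set(buffer)) == marker_length.
def aLoop (ml : Int) (buffer : List Char) (i : Nat) : List Char → Option Int
  | [] => none
  | c :: rest =>
    let b1 := buffer ++ [c]                                   -- buffer.append(s[i])
    let b2 := if ml < (b1.length : Int) then b1.drop 1 else b1  -- if len(buffer)>ml: buffer.pop(0)
    if ml = ((PySem.Set.ofList b2).length : Int) then some ((i : Int) + 1)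
    else aLoop ml b2 (i + 1) rest

def get_marker_position (s : String) (marker_length : Int) : Option Int :=
  aLoop marker_length [] 0 s.toList

-- ===== PORT B =====
-- the inner while loop: shrink the window [start, i] until its size is ≤ ml
def bShrink (cs : List Char) (ml : Int) (i : Nat) (start : Nat)
    (counts : PySem.Dict Char Int) (distinct : Int) : Nat × PySem.Dict Char Int × Int :=
  if h : start ≤ i ∧ ml < (i : Int) + 1 - (start : Int) then
    let d := cs.getD start ' '                                -- s[start]; start ≤ i < len(s)
    let counts' := counts.insert d (counts.getD d 0 - 1)      -- counts[d] -= 1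
    let distinct' := if counts'.getD d 0 = 0 then distinct - 1 else distinct
    bShrink cs ml i (start + 1) counts' distinct'
  else (start, counts, distinct)
termination_by i + 1 - start
decreasing_by omega

def bLoop (cs : List Char) (ml : Int) (i start : Nat)
    (counts : PySem.Dict Char Int) (distinct : Int) : Option Int :=
  if h : i < cs.length then
    let c := cs.getD i ' '                                    -- s[i], in range
    let counts1 := counts.insert c (counts.getD c 0 + 1)      -- counts[c] = counts.get(c,0)+1
    let distinct1 := if counts1.getD c 0 = 1 then distinct + 1 else distinct
    let r := bShrink cs ml i start counts1 distinct1
    if r.2.2 = ml then some ((i : Int) + 1)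
    else bLoop cs ml (i + 1) r.1 r.2.1 r.2.2
  else none
termination_by cs.length - i

def get_marker_position_alt (s : String) (marker_length : Int) : Option Int :=
  bLoop s.toList marker_length 0 0 PySem.Dict.empty 0

-- ===== PRECONDITION & SPEC =====
def Spec_get_marker_position (s : String) (marker_length : Int) (out : Option Int) : Prop := out = get_marker_position_alt s marker_length
instance (s : String) (marker_length : Int) (out : Option Int) : Decidable (Spec_get_marker_position s marker_length out) := by unfold Spec_get_marker_position; infer_instance

-- ===== CLAIM (what is proved, stated in full; the proofs are below) =====
def Claim_equal_get_marker_position : Prop := ∀ (s : String) (marker_length : Int), Dom_get_marker_position s marker_length → Spec_get_marker_position s marker_length (get_marker_position s marker_length)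

-- ===== LEMMAS AND PROOFS =====

-- |set(l)| as a Finset cardinality
lemma len_ofList_eq_card (l : List Char) :
    (PySem.Set.ofList l).length = l.toFinset.card := by
  have h1 : (PySem.Set.ofList l).Nodup := PySem.Set.nodup_ofList l
  have h2 : (PySem.Set.ofList l).toFinset = l.toFinset := by
    ext x; simp [PySem.Set.mem_ofList]
  rw [← h2, List.toFinset_card_of_nodup h1]

lemma len_ofList_append (l : List Char) (c : Char) :
    ((PySem.Set.ofList (l ++ [c])).length : Int)
      = (PySem.Set.ofList l).length + (if c ∈ l then 0 else 1) := by
  rw [len_ofList_eq_card, len_ofList_eq_card]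
  have he : (l ++ [c]).toFinset = insert c l.toFinset := by ext x; simp
  rw [he]
  by_cases h : c ∈ l
  · rw [Finset.insert_eq_self.2 (List.mem_toFinset.2 h), if_pos h]; ring
  · rw [Finset.card_insert_of_notMem (by simpa using h), if_neg h]; push_cast; ring

lemma len_ofList_cons (d : Char) (l : List Char) :
    ((PySem.Set.ofList l).length : Int)
      = (PySem.Set.ofList (d :: l)).length - (if d ∈ l then 0 else 1) := by
  rw [len_ofList_eq_card, len_ofList_eq_card, List.toFinset_cons]
  by_cases h : d ∈ l
  · rw [Finset.insert_eq_self.2 (List.mem_toFinset.2 h), if_pos h]; ring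
  · rw [Finset.card_insert_of_notMem (by simpa using h), if_neg h]; push_cast; ring

-- the invariant-carrying main lemma: the two loops agree
lemma loop_eq (cs : List Char) (ml : Int) :
    ∀ (k i start : Nat) (counts : PySem.Dict Char Int) (distinct : Int)
      (buffer : List Char),
      cs.length - i = k →
      start ≤ i → i ≤ cs.length →
      buffer = (cs.take i).drop start →
      (i : Int) - start ≤ max ml 0 →
      (∀ ch, counts.getD ch 0 = (buffer.count ch : Int)) →
      distinct = ((PySem.Set.ofList buffer).length : Int) →
      aLoop ml buffer i (cs.drop i) = bLoop cs ml i start counts distinct := by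
  intro k
  induction k with
  | zero =>
    intro i start counts distinct buffer hk hsi hil hbuf hw hc hd
    have hie : i = cs.length := by omega
    rw [bLoop]
    simp [hie, List.drop_length, aLoop]
  | succ k ih =>
    intro i start counts distinct buffer hk hsi hil hbuf hw hc hd
    have hi : i < cs.length := by omega
    -- decompose the remaining input
    have hdrop : cs.drop i = cs[i] :: cs.drop (i + 1) := List.drop_eq_getElem_cons hi
    have hgetDi : cs.getD i ' ' = cs[i] := by
      simp [List.getD_eq_getElem?_getD, List.getElem?_eq_getElem hi]
    set c := cs[i] with hc_def
    -- the appended buffer is the slice up to i+1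
    have htake1 : cs.take (i + 1) = cs.take i ++ [c] := by
      rw [List.take_add_one, List.getElem?_eq_getElem hi]; rfl
    have hb1 : buffer ++ [c] = (cs.take (i + 1)).drop start := by
      rw [hbuf, htake1,
        List.drop_append_of_le_length (by rw [List.length_take]; omega)]
    have hlenbuf : buffer.length = i - start := by
      rw [hbuf]; simp; omega
    have hlenb1 : (buffer ++ [c]).length = i - start + 1 := by simp [hlenbuf]
    -- B side: state after counting c
    have hc1 : ∀ ch, (counts.insert c (counts.getD c 0 + 1)).getD ch 0
        = ((buffer ++ [c]).count ch : Int) := by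
      intro ch
      rw [PySem.Dict.getD_insert]
      by_cases h : ch = c
      · simp [h, hc c, List.count_append]
      · simp [h, hc ch, List.count_append, Ne.symm h]
    have hd1 : (if (counts.insert c (counts.getD c 0 + 1)).getD c 0 = 1
          then distinct + 1 else distinct)
        = ((PySem.Set.ofList (buffer ++ [c])).length : Int) := by
      have hcnt : (buffer ++ [c]).count c = buffer.count c + 1 := by simp
      rw [hc1 c, hcnt, len_ofList_append, ← hd]
      by_cases h : c ∈ buffer
      · have h1 : 1 ≤ buffer.count c := List.one_le_count_iff.2 h
        rw [if_neg (by push_cast; omega), if_pos h]; ring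
      · rw [if_pos (by rw [List.count_eq_zero.2 h]; norm_num), if_neg h]
    rw [bLoop]; rw [hdrop]
    simp only [hi, dif_pos, hgetDi]
    by_cases hpop : ml < (i : Int) - start + 1
    · -- A pops the front; B's while loop runs exactly once
      have hb1ne : start < (cs.take (i + 1)).length := by simp; omega
      have hheads : (cs.take (i + 1)).drop start
          = (cs.take (i + 1))[start] :: (cs.take (i + 1)).drop (start + 1) :=
        List.drop_eq_getElem_cons hb1ne
      have hgetd : (cs.take (i+1))[start]'hb1ne = cs[start]'(by omega) := by
        simp
      set t := (cs.take (i + 1)).drop (start + 1) with ht_def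
      have hbt : buffer ++ [c] = cs[start]'(by omega) :: t := by
        rw [hb1, hheads, hgetd]
      set d := cs[start]'(by omega) with hd_def
      have hgetDs : cs.getD start ' ' = d := by
        simp [List.getD_eq_getElem?_getD, List.getElem?_eq_getElem (show start < cs.length by omega)]
        rw [hd_def]
      -- counts after the decrement = counts of t
      have hc2 : ∀ ch, ((counts.insert c (counts.getD c 0 + 1)).insert d
            ((counts.insert c (counts.getD c 0 + 1)).getD d 0 - 1)).getD ch 0
          = (t.count ch : Int) := by
        intro ch
        rw [PySem.Dict.getD_insert]
        by_cases h : ch = d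
        · rw [if_pos h, h, hc1 d, hbt]
          simp
        · rw [if_neg h, hc1 ch, hbt]
          simp [Ne.symm h]
      -- distinct after the decrement = |set(t)|
      have hd2 : (if ((counts.insert c (counts.getD c 0 + 1)).insert d
              ((counts.insert c (counts.getD c 0 + 1)).getD d 0 - 1)).getD d 0 = 0
            then ((PySem.Set.ofList (buffer ++ [c])).length : Int) - 1
            else ((PySem.Set.ofList (buffer ++ [c])).length : Int))
          = ((PySem.Set.ofList t).length : Int) := by
        rw [hc2 d, hbt, len_ofList_cons d t]
        by_cases h : d ∈ t
        · have : (1:Int) ≤ t.count d := by exact_mod_cast List.one_le_count_iff.2 h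
          rw [if_neg (by omega), if_pos h]; ring
        · rw [if_pos (by simp [List.count_eq_zero.2 h]), if_neg h]
      -- unfold bShrink: one iteration, then the guard fails
      have hshrink : bShrink cs ml i start (counts.insert c (counts.getD c 0 + 1))
            (if (counts.insert c (counts.getD c 0 + 1)).getD c 0 = 1 then distinct + 1 else distinct)
          = (start + 1,
             (counts.insert c (counts.getD c 0 + 1)).insert d
               ((counts.insert c (counts.getD c 0 + 1)).getD d 0 - 1),
             (if ((counts.insert c (counts.getD c 0 + 1)).insert d
                   ((counts.insert c (counts.getD c 0 + 1)).getD d 0 - 1)).getD d 0 = 0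
              then (if (counts.insert c (counts.getD c 0 + 1)).getD c 0 = 1 then distinct + 1 else distinct) - 1
              else (if (counts.insert c (counts.getD c 0 + 1)).getD c 0 = 1 then distinct + 1 else distinct))) := by
        rw [bShrink]
        rw [dif_pos (show start ≤ i ∧ ml < (i:Int) + 1 - (start:Int) from ⟨hsi, by omega⟩)]
        rw [bShrink]
        rw [dif_neg (show ¬(start + 1 ≤ i ∧ ml < (i:Int) + 1 - ((start + 1 : Nat):Int)) by push_cast; omega)]
        rw [hgetDs]
      rw [hshrink]
      dsimp only
      have hpop' : ml < ((buffer ++ [c]).length : Int) := by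
        rw [hlenb1]; push_cast; omega
      rw [aLoop]
      simp only [if_pos hpop']
      have hdropt : (buffer ++ [c]).drop 1 = t := by rw [hbt]; simp
      rw [hdropt]
      rw [hd1]
      have hfinal : (if ((counts.insert c (counts.getD c 0 + 1)).insert d
              ((counts.insert c (counts.getD c 0 + 1)).getD d 0 - 1)).getD d 0 = 0
            then ((PySem.Set.ofList (buffer ++ [c])).length : Int) - 1
            else ((PySem.Set.ofList (buffer ++ [c])).length : Int))
          = ((PySem.Set.ofList t).length : Int) := hd2
      rw [hfinal]
      by_cases hret : ((PySem.Set.ofList t).length : Int) = ml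
      · simp [hret]
      · rw [if_neg hret, if_neg (fun h => hret h.symm)]
        exact ih (i + 1) (start + 1) _ _ t (by omega) (by omega) (by omega)
          (by rw [ht_def]) (by push_cast; omega) hc2 rfl
    · -- no pop, no shrink iteration
      have hnopop : ¬ ml < ((buffer ++ [c]).length : Int) := by
        rw [hlenb1]; push_cast; omega
      have hshrink : bShrink cs ml i start (counts.insert c (counts.getD c 0 + 1))
            (if (counts.insert c (counts.getD c 0 + 1)).getD c 0 = 1 then distinct + 1 else distinct)
          = (start, counts.insert c (counts.getD c 0 + 1),
             (if (counts.insert c (counts.getD c 0 + 1)).getD c 0 = 1 then distinct + 1 else distinct)) := by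
        rw [bShrink, dif_neg (show ¬(start ≤ i ∧ ml < (i:Int) + 1 - (start:Int)) by omega)]
      rw [hshrink]
      dsimp only
      rw [aLoop]
      simp only [if_neg hnopop]
      rw [hd1]
      by_cases hret : ((PySem.Set.ofList (buffer ++ [c])).length : Int) = ml
      · simp [hret]
      · rw [if_neg hret, if_neg (fun h => hret h.symm)]
        exact ih (i + 1) start _ _ (buffer ++ [c]) (by omega) (by omega) (by omega)
          hb1 (by push_cast; omega) hc1 rfl

-- ===== VERDICT (by name: the statement is the Claim_ definition above) =====
theorem get_marker_position_spec : Claim_equal_get_marker_position := by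
  intro s ml _
  unfold Spec_get_marker_position get_marker_position get_marker_position_alt
  exact loop_eq s.toList ml s.toList.length 0 0 PySem.Dict.empty 0 [] (by omega)
    (by omega) (by omega) (by simp) (by simp) (by simp) (by simp)
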